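-- pv_equiv track=rewrite | github.com/liushiyu1994/scientific_figure_plotting | figure_plotting_package/common/common_functions.py | load_required_parameter
-- ===== SOURCE A (Python) =====
-- def load_required_parameter(target_dict, source_dict, parameter_set):
--     unused_key_set = set()
--     for key, value in source_dict.items():
--         if key in parameter_set:
--             target_dict[key] = value
--         else:
--             unused_key_set.add(key)
--     return unused_key_set
-- ===== SOURCE B (Python) =====
-- def load_required_parameter(target_dict, source_dict, parameter_set):
--     # Deletion-driven version: walk the REQUESTED keys, moving each hit out of a
--     # shrinking working copy of source_dict; whatever survives is unused.
--     # (Mutates target_dict like the original; the return value is what matters.)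
--     remaining = dict(source_dict)
--     for key in parameter_set:
--         if key in remaining:
--             target_dict[key] = remaining[key]
--             del remaining[key]
--     return set(remaining)
-- ===== Notes on version B (the rewrite author's own statement) =====
-- stated objective: alternative
-- what changed: B inverts the traversal: instead of scanning source_dict and membership-testing every key against parameter_set, it iterates over parameter_set, deleting each matched key from a shrinking working copy of source_dict, and returns the set of keys that survive the deletions.
import Mathlib
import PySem

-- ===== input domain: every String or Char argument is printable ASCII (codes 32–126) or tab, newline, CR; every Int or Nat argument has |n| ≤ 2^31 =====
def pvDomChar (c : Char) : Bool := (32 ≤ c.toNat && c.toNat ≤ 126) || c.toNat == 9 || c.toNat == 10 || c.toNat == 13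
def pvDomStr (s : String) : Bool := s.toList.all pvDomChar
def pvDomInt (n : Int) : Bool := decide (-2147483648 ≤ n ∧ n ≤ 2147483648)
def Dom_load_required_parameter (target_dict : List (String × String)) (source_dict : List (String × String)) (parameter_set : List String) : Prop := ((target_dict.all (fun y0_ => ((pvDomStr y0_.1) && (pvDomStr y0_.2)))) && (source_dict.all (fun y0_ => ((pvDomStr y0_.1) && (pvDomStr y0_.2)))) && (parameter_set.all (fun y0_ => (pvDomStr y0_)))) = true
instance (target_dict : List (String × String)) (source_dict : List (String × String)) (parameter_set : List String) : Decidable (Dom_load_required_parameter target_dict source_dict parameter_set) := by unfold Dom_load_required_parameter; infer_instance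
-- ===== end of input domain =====

-- B inverts the traversal: it walks parameter_set and deletes each matched key from a working
-- copy of source_dict, returning the keys that survive (alternative decomposition). Both Pythons
-- mutate target_dict; the equivalence proved here is about the RETURN value only.

-- ===== PORT A =====
def load_required_parameter (target_dict : List (String × String)) (source_dict : List (String × String)) (parameter_set : List String) : List String :=
  -- unused_key_set = set(); for key, value in source_dict.items(): if key in parameter_set:
  -- target_dict[key] = value else unused_key_set.add(key); return unused_key_set
  (source_dict.foldl
    (fun st kv =>
      if parameter_set.contains kv.1 then (PySem.Dict.insert st.1 kv.1 kv.2, st.2)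
      else (st.1, PySem.Set.add st.2 kv.1))
    (PySem.Dict.mk target_dict, (PySem.Set.empty : PySem.Set String))).2

-- ===== PORT B =====
def load_required_parameter_alt (target_dict : List (String × String)) (source_dict : List (String × String)) (parameter_set : List String) : List String :=
  -- remaining = dict(source_dict); for key in parameter_set: if key in remaining:
  -- target_dict[key] = remaining[key]; del remaining[key]; return set(remaining)
  -- ((remaining.get? key).getD "" is remaining[key], total under the 'key in remaining' guard)
  let st := parameter_set.foldl
    (fun st key =>
      if PySem.Dict.contains st.2 key then
        (PySem.Dict.insert st.1 key ((PySem.Dict.get? st.2 key).getD ""), PySem.Dict.erase st.2 key)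
      else st)
    (PySem.Dict.mk target_dict, PySem.Dict.mk source_dict)
  PySem.Set.ofList (PySem.Dict.keys st.2)

-- ===== PRECONDITION & SPEC =====
def Spec_load_required_parameter (target_dict : List (String × String)) (source_dict : List (String × String)) (parameter_set : List String) (out : List String) : Prop := out = load_required_parameter_alt target_dict source_dict parameter_set
instance (target_dict : List (String × String)) (source_dict : List (String × String)) (parameter_set : List String) (out : List String) : Decidable (Spec_load_required_parameter target_dict source_dict parameter_set out) := by unfold Spec_load_required_parameter; infer_instance

-- ===== CLAIM (what is proved, stated in full; the proofs are below) =====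
def Claim_equal_load_required_parameter : Prop := ∀ (target_dict : List (String × String)) (source_dict : List (String × String)) (parameter_set : List String), Dom_load_required_parameter target_dict source_dict parameter_set → Spec_load_required_parameter target_dict source_dict parameter_set (load_required_parameter target_dict source_dict parameter_set)

-- ===== LEMMAS AND PROOFS =====

-- The second component of A's fold ignores the dict component of the state.
theorem pv_fold_snd (p : String → Bool) (sd : List (String × String))
    (d : PySem.Dict String String) (s : PySem.Set String) :
    (sd.foldl (fun st kv => if p kv.1 then (PySem.Dict.insert st.1 kv.1 kv.2, st.2)
        else (st.1, PySem.Set.add st.2 kv.1)) (d, s)).2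
      = sd.foldl (fun s kv => if p kv.1 then s else PySem.Set.add s kv.1) s := by
  induction sd generalizing d s with
  | nil => rfl
  | cons kv rest ih =>
      simp only [List.foldl_cons]
      by_cases h : p kv.1 = true <;> simp [h, ih]

-- A's conditional-add loop is an update with the filtered key list.
theorem pv_fold_update (p : String → Bool) (l : List (String × String)) (s : PySem.Set String) :
    l.foldl (fun s kv => if p kv.1 then s else PySem.Set.add s kv.1) s
      = PySem.Set.update s ((l.map (·.1)).filter (fun k => !p k)) := by
  induction l generalizing s with
  | nil => simp [PySem.Set.update_nil]
  | cons kv rest ih =>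
      simp only [List.foldl_cons, List.map_cons, List.filter_cons]
      by_cases h : p kv.1 = true <;>
        simp [h, ih, PySem.Set.update_cons]

-- The second component of B's fold ignores the target-dict component of the state.
theorem pv_fold_snd_alt (ps : List String)
    (t : PySem.Dict String String) (d : PySem.Dict String String) :
    (ps.foldl (fun st key =>
        if PySem.Dict.contains st.2 key then
          (PySem.Dict.insert st.1 key ((PySem.Dict.get? st.2 key).getD ""), PySem.Dict.erase st.2 key)
        else st) (t, d)).2
      = ps.foldl (fun d key => if PySem.Dict.contains d key then PySem.Dict.erase d key else d) d := by
  induction ps generalizing t d with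
  | nil => rfl
  | cons k rest ih =>
      simp only [List.foldl_cons]
      by_cases h : PySem.Dict.contains d k = true <;> simp [h, ih]

-- Erasing an absent key is the identity, so the guard is redundant.
theorem pv_erase_guard (d : PySem.Dict String String) (k : String) :
    (if PySem.Dict.contains d k then PySem.Dict.erase d k else d) = PySem.Dict.erase d k := by
  by_cases h : PySem.Dict.contains d k = true
  · simp [h]
  · simp only [h, if_neg, Bool.false_eq_true, not_false_eq_true]
    apply PySem.Dict.ext
    simp only [PySem.Dict.erase]
    symm
    rw [List.filter_eq_self]
    intro p hp
    have hk : ¬ (p.1 == k) = true := fun hc => h (by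
      simp only [PySem.Dict.contains, List.any_eq_true]
      exact ⟨p, hp, hc⟩)
    simp only [beq_iff_eq] at hk
    simp [hk]

-- Folding erase over the key list filters the items by non-membership.
theorem pv_fold_erase_items (ps : List String) (d : PySem.Dict String String) :
    (ps.foldl (fun d key => PySem.Dict.erase d key) d).items
      = d.items.filter (fun p => !ps.contains p.1) := by
  induction ps generalizing d with
  | nil => simp
  | cons k rest ih =>
      rw [List.foldl_cons, ih]
      simp only [PySem.Dict.erase, List.filter_filter]
      congr 1
      funext p
      by_cases hpk : p.1 = k <;> by_cases hpr : p.1 ∈ rest <;>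
        simp [hpk, hpr]

-- Filtering by a key predicate commutes with projecting the keys.
theorem pv_map_fst_filter (q : String → Bool) (l : List (String × String)) :
    (l.filter (fun p => q p.1)).map (·.1) = (l.map (·.1)).filter q := by
  induction l with
  | nil => rfl
  | cons kv rest ih =>
      simp only [List.filter_cons, List.map_cons]
      by_cases h : q kv.1 = true <;> simp [h, ih]

-- ===== VERDICT (by name: the statement is the Claim_ definition above) =====
theorem load_required_parameter_spec : Claim_equal_load_required_parameter := by
  intro target_dict source_dict parameter_set _dom
  unfold Spec_load_required_parameter load_required_parameter load_required_parameter_alt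
  rw [pv_fold_snd, pv_fold_update, PySem.Set.update_empty]
  simp only [pv_fold_snd_alt]
  have hguard : (fun (d : PySem.Dict String String) key =>
      if PySem.Dict.contains d key then PySem.Dict.erase d key else d)
      = fun d key => PySem.Dict.erase d key := by
    funext d k; exact pv_erase_guard d k
  rw [hguard, PySem.Dict.keys]
  rw [pv_fold_erase_items]
  rw [show (PySem.Dict.mk source_dict).items = source_dict from rfl]
  rw [pv_map_fst_filter (fun k => !parameter_set.contains k) source_dict]
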